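-- pv_equiv track=rewrite | github.com/jrojasg1/LAB6 | reto3.py | reducer_day_stats
-- ===== SOURCE A (Python) =====
-- def reducer_day_stats(key, values):
--     if key == 'user_stats':
--         for user, count_ratings, avg_rating in values:
--             yield 'user_stats', (user, count_ratings, avg_rating)
--     elif key == 'day_stats':
--         day_data = list(values)
--         day_most_movies = max(day_data, key=lambda x: x[1])
--         day_least_movies = min(day_data, key=lambda x: x[1])
--         day_worst_rating = min(day_data, key=lambda x: x[2])
--         day_best_rating = max(day_data, key=lambda x: x[2])
--         yield 'day_most_movies', day_most_movies
--         yield 'day_least_movies', day_least_movies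
--         yield 'day_worst_rating', day_worst_rating
--         yield 'day_best_rating', day_best_rating
--     else:
--         for value in values:
--             yield key, value
-- ===== SOURCE B (Python) =====
-- def reducer_day_stats(key, values):
--     if key == 'user_stats':
--         for user, count_ratings, avg_rating in values:
--             yield 'user_stats', (user, count_ratings, avg_rating)
--     elif key == 'day_stats':
--         day_data = list(values)
--         most = least = worst = best = day_data[0]
--         for x in day_data[1:]:
--             if x[1] > most[1]:
--                 most = x
--             if x[1] < least[1]:
--                 least = x
--             if x[2] < worst[2]:
--                 worst = x
--             if x[2] > best[2]:
--                 best = x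
--         yield 'day_most_movies', most
--         yield 'day_least_movies', least
--         yield 'day_worst_rating', worst
--         yield 'day_best_rating', best
--     else:
--         for value in values:
--             yield key, value
-- ===== Notes on version B (the rewrite author's own statement) =====
-- stated objective: alternative
-- what changed: The day_stats branch computes all four extremes in one single pass over the data instead of four separate max/min scans (strict comparisons preserve first-occurrence tie-breaking); Pre_ excludes key='day_stats' with empty values, where both programs raise (A ValueError from max([]), B IndexError from day_data[0]).
import Mathlib
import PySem

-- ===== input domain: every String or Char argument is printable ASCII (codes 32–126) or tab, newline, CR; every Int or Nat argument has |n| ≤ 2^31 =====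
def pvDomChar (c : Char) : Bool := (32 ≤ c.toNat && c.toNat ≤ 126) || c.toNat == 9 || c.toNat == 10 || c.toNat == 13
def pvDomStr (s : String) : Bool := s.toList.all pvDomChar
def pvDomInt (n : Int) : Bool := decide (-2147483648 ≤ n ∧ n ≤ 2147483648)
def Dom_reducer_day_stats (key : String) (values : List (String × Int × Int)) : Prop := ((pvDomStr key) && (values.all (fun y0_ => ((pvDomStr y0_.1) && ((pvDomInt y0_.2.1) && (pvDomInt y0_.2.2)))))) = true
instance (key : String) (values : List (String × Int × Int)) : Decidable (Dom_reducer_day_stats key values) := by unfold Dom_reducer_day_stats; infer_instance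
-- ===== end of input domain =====

-- B computes all four day_stats extremes in one single pass instead of four separate max/min scans.

-- ===== PORT A =====
def reducer_day_stats (key : String) (values : List (String × Int × Int)) : List (String × (String × Int × Int)) :=
  if key == "user_stats" then
    values.map (fun v => ("user_stats", v))
  else if key == "day_stats" then
    match PySem.List.max? values (fun x => x.2.1),
          PySem.List.min? values (fun x => x.2.1),
          PySem.List.min? values (fun x => x.2.2),
          PySem.List.max? values (fun x => x.2.2) with
    | some mm, some lm, some wr, some br =>
        [("day_most_movies", mm), ("day_least_movies", lm),
         ("day_worst_rating", wr), ("day_best_rating", br)]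
    | _, _, _, _ => []   -- max([]) raises ValueError; excluded by Pre_
  else
    values.map (fun v => (key, v))

-- ===== PORT B =====
def reducer_day_stats_alt (key : String) (values : List (String × Int × Int)) : List (String × (String × Int × Int)) :=
  if key == "user_stats" then
    values.map (fun v => ("user_stats", v))
  else if key == "day_stats" then
    match values with
    | [] => []   -- day_data[0] raises IndexError here; excluded by Pre_
    | x :: rest =>
        let s := rest.foldl
          (fun (s : (String × Int × Int) × (String × Int × Int) × (String × Int × Int) × (String × Int × Int)) y =>
            (if y.2.1 > s.1.2.1 then y else s.1,
             if y.2.1 < s.2.1.2.1 then y else s.2.1,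
             if y.2.2 < s.2.2.1.2.2 then y else s.2.2.1,
             if y.2.2 > s.2.2.2.2.2 then y else s.2.2.2))
          (x, x, x, x)
        [("day_most_movies", s.1), ("day_least_movies", s.2.1),
         ("day_worst_rating", s.2.2.1), ("day_best_rating", s.2.2.2)]
  else
    values.map (fun v => (key, v))

-- ===== PRECONDITION & SPEC =====
-- Pre_ excludes only key = "day_stats" with empty values, where both programs raise
-- (A: ValueError from max([]); B: IndexError from day_data[0]).
def Pre_reducer_day_stats (key : String) (values : List (String × Int × Int)) : Prop :=
  key = "day_stats" → values ≠ []
instance (key : String) (values : List (String × Int × Int)) : Decidable (Pre_reducer_day_stats key values) := by unfold Pre_reducer_day_stats; infer_instance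
def pvWitness_reducer_day_stats : String × (List (String × Int × Int)) :=
  ("day_stats", [("a", 2, 5), ("b", 3, 1)])
def Spec_reducer_day_stats (key : String) (values : List (String × Int × Int)) (out : List (String × (String × Int × Int))) : Prop := out = reducer_day_stats_alt key values
instance (key : String) (values : List (String × Int × Int)) (out : List (String × (String × Int × Int))) : Decidable (Spec_reducer_day_stats key values out) := by unfold Spec_reducer_day_stats; infer_instance

-- ===== CLAIM (what is proved, stated in full; the proofs are below) =====
def Claim_equal_reducer_day_stats : Prop := ∀ (key : String) (values : List (String × Int × Int)), Dom_reducer_day_stats key values → Pre_reducer_day_stats key values → Spec_reducer_day_stats key values (reducer_day_stats key values)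

-- ===== LEMMAS AND PROOFS =====

theorem max?_cons_foldl {α : Type} (k : α → Int) (t : List α) (x : α) :
    PySem.List.max? (x :: t) k = some (t.foldl (fun b y => if k b < k y then y else b) x) := by
  induction t generalizing x with
  | nil => rfl
  | cons y t ih =>
      simp only [PySem.List.max?, List.foldl] at *
      by_cases h : k x < k y <;> simp [h, ih]

theorem min?_cons_foldl {α : Type} (k : α → Int) (t : List α) (x : α) :
    PySem.List.min? (x :: t) k = some (t.foldl (fun b y => if k y < k b then y else b) x) := by
  induction t generalizing x with
  | nil => rfl
  | cons y t ih =>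
      simp only [PySem.List.min?, List.foldl] at *
      by_cases h : k y < k x <;> simp [h, ih]

theorem foldl_prod4 {α β : Type} (f1 f2 f3 f4 : β → α → β) (t : List α) (a b c d : β) :
    t.foldl (fun (s : β × β × β × β) y =>
        (f1 s.1 y, f2 s.2.1 y, f3 s.2.2.1 y, f4 s.2.2.2 y)) (a, b, c, d)
    = (t.foldl f1 a, t.foldl f2 b, t.foldl f3 c, t.foldl f4 d) := by
  induction t generalizing a b c d with
  | nil => rfl
  | cons y t ih => simp [List.foldl, ih]

-- ===== VERDICT (by name: the statement is the Claim_ definition above) =====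

theorem reducer_day_stats_spec : Claim_equal_reducer_day_stats := by
  intro key values _ hpre
  unfold Spec_reducer_day_stats reducer_day_stats reducer_day_stats_alt
  by_cases h1 : key == "user_stats"
  · simp [h1]
  · simp only [h1, Bool.false_eq_true, if_false]
    by_cases h2 : key == "day_stats"
    · simp only [h2, if_true]
      have hkey : key = "day_stats" := by simpa using h2
      cases values with
      | nil => exact absurd rfl (hpre hkey)
      | cons x rest =>
          simp only [gt_iff_lt]
          rw [max?_cons_foldl, min?_cons_foldl, min?_cons_foldl, max?_cons_foldl,
            foldl_prod4 (fun b (y : String × Int × Int) => if b.2.1 < y.2.1 then y else b)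
              (fun b y => if y.2.1 < b.2.1 then y else b)
              (fun b y => if y.2.2 < b.2.2 then y else b)
              (fun b y => if b.2.2 < y.2.2 then y else b) rest x x x x]
    · simp [h2]
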